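-- pv_equiv track=rewrite | github.com/chelsinchaos/min-max | db/database.py | ith_permutation
-- ===== SOURCE A (Python) =====
-- def ith_permutation(n, k, i):
--     elements = list(range(n))
--     perm = []
--     for _ in range(k):
--         if not elements:
--             break
--         index = int(i % len(elements))
--         perm.append(elements[index])
--         elements.remove(elements[index])
--         if not elements:
--             break
--         i //= len(elements)
--     return sum(perm)
-- ===== SOURCE B (Python) =====
-- def ith_permutation(n, k, i):
--     # Track only the sorted list of already-picked values instead of the whole
--     # n-element list; once i reaches 0 every further step picks the smallest
--     # remaining value, so the rest of the sum is added in closed form.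
--     total = 0
--     removed = []               # sorted list of already-picked values
--     m = n if n > 0 else 0      # how many values remain
--     steps = k if k > 0 else 0  # loop iterations left
--     while steps > 0 and m > 0 and i != 0:
--         x = i % m
--         for r in removed:
--             if r <= x:
--                 x += 1
--         total += x
--         removed = [r for r in removed if r < x] + [x] + [r for r in removed if r > x]
--         m -= 1
--         steps -= 1
--         if m > 0:
--             i //= m
--     if steps > 0 and m > 0:    # i == 0: the j remaining picks are the j smallest values left
--         j = steps if steps < m else m
--         c = j - 1              # value of the last (largest) pick
--         for r in removed:
--             if r <= c:
--                 c += 1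
--         # picked values = all of range(c + 1) not yet removed
--         total += c * (c + 1) // 2
--         for r in removed:
--             if r <= c:
--                 total -= r
--     return total
-- ===== Notes on version B (the rewrite author's own statement) =====
-- stated objective: faster
-- what changed: Instead of materialising list(range(n)) and deleting the selected element each round (an O(n) scan/shift per step for k steps), B keeps only the sorted list of already-picked values, recovers each pick by skipping picked values at or below it, and -- since i floor-divides to 0 after at most ~log(i) rounds, after which every pick is the smallest remaining value -- adds the whole remaining run as an arithmetic series in closed form.
import Mathlib
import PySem

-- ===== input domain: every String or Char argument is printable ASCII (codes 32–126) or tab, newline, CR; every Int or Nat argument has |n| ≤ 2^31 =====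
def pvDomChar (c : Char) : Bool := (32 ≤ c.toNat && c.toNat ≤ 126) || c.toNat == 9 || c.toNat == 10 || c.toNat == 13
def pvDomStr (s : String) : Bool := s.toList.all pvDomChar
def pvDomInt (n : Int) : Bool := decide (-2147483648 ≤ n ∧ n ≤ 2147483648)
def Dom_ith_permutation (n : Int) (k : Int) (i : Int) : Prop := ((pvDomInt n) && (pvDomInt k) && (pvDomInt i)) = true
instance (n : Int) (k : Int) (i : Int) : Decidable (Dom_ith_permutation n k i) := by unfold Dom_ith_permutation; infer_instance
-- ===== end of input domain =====

-- B tracks only the sorted list of already-picked values (skipping over them to recover each pick) and, once i floor-divides to 0, adds the remaining picks as an arithmetic series in closed form; objective: faster (measured).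

-- ===== PORT A =====
-- literal port of A's loop: elements list, perm accumulator, i updated in place
def aLoop : Nat → List Int → List Int → Int → List Int
  | 0, _, perm, _ => perm
  | t+1, elems, perm, i =>
    if elems = [] then perm
    else
      let index := PySem.Int.mod i (elems.length : Int)
      match PySem.List.pyGet? elems index with
      | none => perm            -- unreachable: index is in range
      | some v =>
        match PySem.List.remove? elems v with
        | none => perm ++ [v]   -- unreachable: v ∈ elems
        | some elems' =>
          if elems' = [] then perm ++ [v]
          else aLoop t elems' (perm ++ [v]) (PySem.Int.floordiv i (elems'.length : Int))

def ith_permutation (n : Int) (k : Int) (i : Int) : Int :=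
  (aLoop k.toNat (PySem.List.pyRange 0 n 1) [] i).sum

-- ===== PORT B =====
-- the inner "for r in removed: if r <= x: x += 1" of Source B (also the c-scan of the tail)
def bSelect (removed : List Int) (x : Int) : Int :=
  removed.foldl (fun x r => if r ≤ x then x + 1 else x) x

-- the while loop of Source B; returns the final (steps, m, removed, total, i)
def b2Loop : Nat → Int → List Int → Int → Int → Nat × Int × List Int × Int × Int
  | 0, m, removed, total, i => (0, m, removed, total, i)
  | steps+1, m, removed, total, i =>
    if m = 0 ∨ i = 0 then (steps+1, m, removed, total, i)
    else
      let x := bSelect removed (PySem.Int.mod i m)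
      let total' := total + x
      let removed' := removed.filter (fun r => decide (r < x)) ++ [x] ++ removed.filter (fun r => decide (r > x))
      let i' := if m - 1 > 0 then PySem.Int.floordiv i (m - 1) else i
      b2Loop steps (m - 1) removed' total' i'

-- the closed-form tail of Source B (only reached with i = 0)
def b2Tail : Nat × Int × List Int × Int × Int → Int
  | (steps, m, removed, total, _) =>
    if steps > 0 ∧ m > 0 then
      let j : Int := if (steps : Int) < m then (steps : Int) else m
      let c := removed.foldl (fun c r => if r ≤ c then c + 1 else c) (j - 1)
      let total := total + PySem.Int.floordiv (c * (c + 1)) 2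
      removed.foldl (fun tot r => if r ≤ c then tot - r else tot) total
    else total

def ith_permutation_alt (n : Int) (k : Int) (i : Int) : Int :=
  b2Tail (b2Loop k.toNat (if n > 0 then n else 0) [] 0 i)

-- ===== PRECONDITION & SPEC =====
def Spec_ith_permutation (n : Int) (k : Int) (i : Int) (out : Int) : Prop := out = ith_permutation_alt n k i
instance (n : Int) (k : Int) (i : Int) (out : Int) : Decidable (Spec_ith_permutation n k i out) := by unfold Spec_ith_permutation; infer_instance

-- ===== CLAIM (what is proved, stated in full; the proofs are below) =====
def Claim_equal_ith_permutation : Prop := ∀ (n : Int) (k : Int) (i : Int), Dom_ith_permutation n k i → Spec_ith_permutation n k i (ith_permutation n k i)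

-- ===== LEMMAS AND PROOFS =====

-- proof-side model of the simulation loop without the i = 0 shortcut
def bLoop : Nat → Int → List Int → Int → Int → Int
  | 0, _, _, total, _ => total
  | t+1, m, removed, total, i =>
    if m = 0 then total
    else
      let x := bSelect removed (PySem.Int.mod i m)
      let total' := total + x
      let removed' := removed.filter (fun r => decide (r < x)) ++ [x] ++ removed.filter (fun r => decide (r > x))
      if m - 1 = 0 then total'
      else bLoop t (m - 1) removed' total' (PySem.Int.floordiv i (m - 1))

-- the remaining elements, as A sees them, given the removed list R
def comp (n : Int) (R : List Int) : List Int :=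
  (PySem.List.pyRange 0 n 1).filter (fun c => decide (c ∉ R))

theorem bSelect_gt (R : List Int) (x : Int) (h : ∀ r ∈ R, x < r) : bSelect R x = x := by
  induction R with
  | nil => rfl
  | cons r rs ih =>
    have hr : ¬ r ≤ x := by have := h r (by simp); omega
    show List.foldl _ (if r ≤ x then x + 1 else x) rs = x
    rw [if_neg hr]
    exact ih (fun r' hr' => h r' (List.mem_cons_of_mem _ hr'))

-- key lemma: the x-th element of the range [a, b) with the sorted R removed is bSelect R (a + x)
theorem select_get (R : List Int) (b : Int) : ∀ (a x : Int),
    R.Pairwise (· < ·) → (∀ r ∈ R, a ≤ r) → 0 ≤ x →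
    x < (((PySem.List.pyRange a b 1).filter (fun c => decide (c ∉ R))).length : Int) →
    PySem.List.pyGet? ((PySem.List.pyRange a b 1).filter (fun c => decide (c ∉ R))) x
      = some (bSelect R (a + x)) := by
  induction R with
  | nil =>
    intro a x _ _ hx0 hx
    simp only [List.not_mem_nil, not_false_eq_true, decide_true, List.filter_true] at hx ⊢
    rw [PySem.List.pyGet?_of_nonneg _ hx0, PySem.List.getElem?_pyRange_one]
    rw [PySem.List.length_pyRange_one] at hx
    rw [if_pos (by omega)]
    show _ = some (bSelect [] (a + x))
    simp [bSelect]
    omega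
  | cons r rs ih =>
    intro a x hs hlo hx0 hx
    have hrs : ∀ r' ∈ rs, r < r' := fun r' h' => (List.pairwise_cons.mp hs).1 r' h'
    have hssort : rs.Pairwise (· < ·) := (List.pairwise_cons.mp hs).2
    have har : a ≤ r := hlo r (by simp)
    have hlen_le : (((PySem.List.pyRange a b 1).filter (fun c => decide (c ∉ (r :: rs)))).length : Int)
        ≤ (b - a).toNat := by
      have := List.length_filter_le (fun c => decide (c ∉ (r :: rs))) (PySem.List.pyRange a b 1)
      rw [PySem.List.length_pyRange_one] at this
      exact_mod_cast this
    by_cases hrb : r < b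
    · -- split the range at r
      have hsplit : PySem.List.pyRange a b 1
          = PySem.List.pyRange a r 1 ++ (r :: PySem.List.pyRange (r+1) b 1) := by
        rw [PySem.List.pyRange_one_append a r b har (le_of_lt hrb),
          PySem.List.pyRange_one_cons hrb]
      have hleft : (PySem.List.pyRange a r 1).filter (fun c => decide (c ∉ (r :: rs)))
          = PySem.List.pyRange a r 1 := by
        apply List.filter_eq_self.mpr
        intro c hc
        have hcb := (PySem.List.mem_pyRange_one).mp hc
        have : c ∉ (r :: rs) := by
          intro hmem
          rcases List.mem_cons.mp hmem with h | h
          · omega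
          · have := hrs c h; omega
        simpa using this
      have hright : (PySem.List.pyRange (r+1) b 1).filter (fun c => decide (c ∉ (r :: rs)))
          = (PySem.List.pyRange (r+1) b 1).filter (fun c => decide (c ∉ rs)) := by
        apply List.filter_congr
        intro c hc
        have hcb := (PySem.List.mem_pyRange_one).mp hc
        simp only [List.mem_cons, decide_eq_decide]
        constructor
        · intro h hr2; exact h (Or.inr hr2)
        · intro h hr2; rcases hr2 with h2 | h2
          · omega
          · exact h h2
      have hL : (PySem.List.pyRange a b 1).filter (fun c => decide (c ∉ (r :: rs)))
          = PySem.List.pyRange a r 1 ++ (PySem.List.pyRange (r+1) b 1).filter (fun c => decide (c ∉ rs)) := by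
        rw [hsplit, List.filter_append, hleft,
          List.filter_cons_of_neg (by simp), hright]
      rw [hL]
      rw [hL, List.length_append, PySem.List.length_pyRange_one] at hx
      by_cases hcase : a + x < r
      · -- the x-th element sits in the untouched prefix [a, r)
        have hxlt : x.toNat < (PySem.List.pyRange a r 1).length := by
          rw [PySem.List.length_pyRange_one]; omega
        rw [PySem.List.pyGet?_of_nonneg _ hx0, List.getElem?_append_left hxlt,
          PySem.List.getElem?_pyRange_one, if_pos (by rw [PySem.List.length_pyRange_one] at hxlt; omega)]
        have hfold : bSelect (r :: rs) (a + x) = bSelect rs (a + x) := by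
          show List.foldl _ (if r ≤ a + x then _ else _) rs = _
          rw [if_neg (by omega)]; rfl
        rw [hfold, bSelect_gt rs (a + x) (fun r' h' => by have := hrs r' h'; omega)]
        simp
        omega
      · -- the x-th element is in the filtered suffix: shift by (r - a) and recurse
        have hlen1 : (PySem.List.pyRange a r 1).length = (r - a).toNat :=
          PySem.List.length_pyRange_one a r
        have hge : (PySem.List.pyRange a r 1).length ≤ x.toNat := by omega
        rw [PySem.List.pyGet?_of_nonneg _ hx0, List.getElem?_append_right hge]
        have hx' : x.toNat - (PySem.List.pyRange a r 1).length = (x - (r - a)).toNat := by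
          omega
        rw [hx']
        have hrec := ih (r + 1) (x - (r - a)) hssort
          (fun r' h' => by have := hrs r' h'; omega) (by omega) (by omega)
        rw [PySem.List.pyGet?_of_nonneg _ (by omega : (0:Int) ≤ x - (r - a))] at hrec
        rw [hrec]
        have hfold : bSelect (r :: rs) (a + x) = bSelect rs (a + x + 1) := by
          show List.foldl _ (if r ≤ a + x then _ else _) rs = _
          rw [if_pos (by omega)]; rfl
        rw [hfold]
        congr 1
        congr 1
        omega
    · -- r ≥ b: r lies outside the range, so dropping it from R changes nothing
      have hR : (PySem.List.pyRange a b 1).filter (fun c => decide (c ∉ (r :: rs)))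
          = (PySem.List.pyRange a b 1).filter (fun c => decide (c ∉ rs)) := by
        apply List.filter_congr
        intro c hc
        have hcb := (PySem.List.mem_pyRange_one).mp hc
        simp only [List.mem_cons, decide_eq_decide]
        constructor
        · intro h hr2; exact h (Or.inr hr2)
        · intro h hr2; rcases hr2 with h2 | h2
          · omega
          · exact h h2
      rw [hR] at hx ⊢
      rw [ih a x hssort (fun r' h' => by have := hrs r' h'; omega) hx0 hx]
      have hfold : bSelect (r :: rs) (a + x) = bSelect rs (a + x) := by
        show List.foldl _ (if r ≤ a + x then _ else _) rs = _
        rw [if_neg (by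
          have hle : (((PySem.List.pyRange a b 1).filter (fun c => decide (c ∉ rs))).length : Int) ≤ (b - a).toNat := by
            have := List.length_filter_le (fun c => decide (c ∉ rs)) (PySem.List.pyRange a b 1)
            rw [PySem.List.length_pyRange_one] at this
            exact_mod_cast this
          omega)]
        rfl
      rw [hfold]

theorem comp_erase (n : Int) (R : List Int) (v : Int) (hv : v ∉ R) :
    (comp n R).erase v
      = comp n (R.filter (fun r => decide (r < v)) ++ [v] ++ R.filter (fun r => decide (r > v))) := by
  have hnd : (comp n R).Nodup := (PySem.List.nodup_pyRange_one 0 n).filter _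
  rw [List.Nodup.erase_eq_filter (a := v) hnd]
  unfold comp
  rw [List.filter_filter]
  apply List.filter_congr
  intro c _
  by_cases hcv : c = v
  · subst hcv; simp [hv]
  · by_cases hcR : c ∈ R
    · simp [hcv, hcR]
    · simp [hcv, hcR]

theorem sorted_insert (R : List Int) (v : Int) (hs : R.Pairwise (· < ·)) :
    (R.filter (fun r => decide (r < v)) ++ [v] ++ R.filter (fun r => decide (r > v))).Pairwise (· < ·) := by
  rw [List.append_assoc, List.singleton_append, List.pairwise_append]
  refine ⟨hs.filter _, ?_, ?_⟩
  · rw [List.pairwise_cons]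
    refine ⟨fun y hy => ?_, hs.filter _⟩
    simp only [List.mem_filter, decide_eq_true_eq] at hy
    exact hy.2
  · intro a ha y hy
    simp only [List.mem_filter, decide_eq_true_eq] at ha
    rcases List.mem_cons.mp hy with h | h
    · omega
    · simp only [List.mem_filter, decide_eq_true_eq] at h
      omega

theorem main_inv (n : Int) : ∀ (t : Nat) (R perm : List Int) (i : Int),
    R.Pairwise (· < ·) → (∀ r ∈ R, 0 ≤ r) →
    (aLoop t (comp n R) perm i).sum = bLoop t ((comp n R).length : Int) R perm.sum i := by
  intro t
  induction t with
  | zero => intro R perm i _ _; rfl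
  | succ t ih =>
    intro R perm i hs h0
    by_cases hE : comp n R = []
    · rw [hE]
      simp [aLoop, bLoop]
    · have hlen : 0 < (comp n R).length := List.length_pos_iff.mpr hE
      have hm0 : ¬ ((comp n R).length : Int) = 0 := by omega
      have hmod0 : 0 ≤ PySem.Int.mod i ((comp n R).length : Int) := by
        rw [PySem.Int.mod_eq_emod_of_pos (by omega)]
        exact Int.emod_nonneg i (by omega)
      have hmodlt : PySem.Int.mod i ((comp n R).length : Int) < ((comp n R).length : Int) := by
        rw [PySem.Int.mod_eq_emod_of_pos (by omega)]
        exact Int.emod_lt_of_pos i (by omega)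
      have hget : PySem.List.pyGet? (comp n R) (PySem.Int.mod i ((comp n R).length : Int))
          = some (bSelect R (PySem.Int.mod i ((comp n R).length : Int))) := by
        have := select_get R n 0 (PySem.Int.mod i ((comp n R).length : Int)) hs h0 hmod0
          (by unfold comp at hmodlt ⊢; exact hmodlt)
        rw [zero_add] at this
        exact this
      set v := bSelect R (PySem.Int.mod i ((comp n R).length : Int)) with hv
      have hvE : v ∈ comp n R := PySem.List.mem_of_pyGet?_eq_some _ hget
      have hvR : v ∉ R := by
        have := (List.mem_filter.mp hvE).2
        simpa using this
      have hv0 : 0 ≤ v := by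
        have := (PySem.List.mem_pyRange_one).mp (List.mem_filter.mp hvE).1
        omega
      have hrem : PySem.List.remove? (comp n R) v = some ((comp n R).erase v) :=
        PySem.List.remove?_eq_some_erase _ v hvE
      set R' := R.filter (fun r => decide (r < v)) ++ [v] ++ R.filter (fun r => decide (r > v)) with hR'
      have herase : (comp n R).erase v = comp n R' := comp_erase n R v hvR
      have hlen' : (((comp n R).erase v).length : Int) = ((comp n R).length : Int) - 1 := by
        rw [List.length_erase_of_mem hvE]
        omega
      have hsumapp : (perm ++ [v]).sum = perm.sum + v := by simp
      -- unfold one step of each loop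
      show (aLoop (t+1) (comp n R) perm i).sum = bLoop (t+1) ((comp n R).length : Int) R perm.sum i
      rw [aLoop, bLoop]
      rw [if_neg hE, if_neg hm0]
      simp only [hget, hrem]
      by_cases hE' : (comp n R).erase v = []
      · have hz : ((comp n R).length : Int) - 1 = 0 := by
          rw [← hlen', hE']; rfl
        rw [if_pos hE', if_pos hz, hsumapp]
      · have hnz : ¬ ((comp n R).length : Int) - 1 = 0 := by
          rw [← hlen']
          have : 0 < ((comp n R).erase v).length := List.length_pos_iff.mpr hE'
          omega
        rw [if_neg hE', if_neg hnz]
        have hsort' : R'.Pairwise (· < ·) := sorted_insert R v hs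
        have h0' : ∀ r ∈ R', 0 ≤ r := by
          intro r hr
          rw [hR'] at hr
          simp only [List.mem_append, List.mem_filter, List.mem_singleton] at hr
          rcases hr with (⟨h1,_⟩|h1)|⟨h1,_⟩
          · exact h0 r h1
          · omega
          · exact h0 r h1
        have := ih R' (perm ++ [v]) (PySem.Int.floordiv i (((comp n R).length : Int) - 1)) hsort' h0'
        rw [← herase, hsumapp] at this
        rw [hlen'] at this ⊢
        exact this

theorem foldl_sub_filter (R : List Int) (c : Int) : ∀ (T : Int),
    R.foldl (fun tot r => if r ≤ c then tot - r else tot) T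
      = T - (R.filter (fun r => decide (r ≤ c))).sum := by
  induction R with
  | nil => intro T; simp
  | cons r rs ih =>
    intro T
    by_cases h : r ≤ c
    · rw [List.foldl_cons, if_pos h, ih, List.filter_cons_of_pos (by simpa using h), List.sum_cons]
      omega
    · rw [List.foldl_cons, if_neg h, ih, List.filter_cons_of_neg (by simpa using h)]

theorem sum_filter_split (l : List Int) (p : Int → Bool) :
    l.sum = (l.filter p).sum + (l.filter (fun x => !p x)).sum := by
  induction l with
  | nil => simp
  | cons a l ih =>
    by_cases h : p a
    · simp [List.filter_cons, h, ih]
      omega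
    · simp [List.filter_cons, h, ih]
      omega

theorem take_pairwise_filter (L : List Int) : ∀ (j : Nat) (_ : L.Pairwise (· < ·)) (hj1 : 1 ≤ j)
    (hj : j ≤ L.length), L.take j = L.filter (fun y => decide (y ≤ L[j-1]'(by omega))) := by
  induction L with
  | nil => intro j _ hj1 hj; simp at hj; omega
  | cons a L' ih =>
    intro j hp hj1 hj
    match j, hj1 with
    | 1, _ =>
      simp only [List.take_succ_cons, List.take_zero, List.getElem_cons_zero]
      rw [List.filter_cons_of_pos (by simp), List.filter_eq_nil_iff.mpr]
      intro y hy
      have : a < y := List.rel_of_pairwise_cons hp hy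
      simp
      omega
    | (j'+1+1), _ =>
      have hp' : L'.Pairwise (· < ·) := hp.of_cons
      have hj' : j'+1 ≤ L'.length := by simp at hj; omega
      rw [List.take_succ_cons, ih (j'+1) hp' (by omega) hj']
      simp only [Nat.add_sub_cancel, List.getElem_cons_succ]
      have halt : a < L'[j']'(by omega) := List.rel_of_pairwise_cons hp (List.getElem_mem _)
      rw [List.filter_cons_of_pos (by simp; omega)]

theorem comp_le (n : Int) (R : List Int) (c : Int) (hc0 : 0 ≤ c) (hcn : c < n) :
    (comp n R).filter (fun y => decide (y ≤ c)) = comp (c+1) R := by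
  unfold comp
  rw [List.filter_filter]
  rw [PySem.List.pyRange_one_append 0 (c+1) n (by omega) (by omega), List.filter_append]
  have h2 : (PySem.List.pyRange (c+1) n 1).filter (fun y => decide (y ≤ c) && decide (y ∉ R)) = [] := by
    apply List.filter_eq_nil_iff.mpr
    intro y hy
    have := PySem.List.mem_pyRange_one.mp hy
    simp
    omega
  have h1 : (PySem.List.pyRange 0 (c+1) 1).filter (fun y => decide (y ≤ c) && decide (y ∉ R))
      = (PySem.List.pyRange 0 (c+1) 1).filter (fun y => decide (y ∉ R)) := by
    apply List.filter_congr
    intro y hy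
    have := PySem.List.mem_pyRange_one.mp hy
    have hyc : decide (y ≤ c) = true := by simp; omega
    rw [hyc, Bool.true_and]
  rw [h2, h1, List.append_nil]

theorem sum_pyRange (b : Int) (hb : 0 ≤ b) :
    (PySem.List.pyRange 0 b 1).sum = PySem.Int.floordiv (b * (b - 1)) 2 := by
  induction b, hb using Int.le_induction with
  | base => simp [PySem.List.pyRange_one_eq_nil (by omega : (0:Int) ≤ 0), PySem.Int.floordiv]
  | succ b hb ihb =>
    rw [PySem.List.pyRange_one_succ_right (by omega), List.sum_append, ihb, List.sum_cons,
      List.sum_nil, PySem.Int.floordiv_eq_ediv_of_pos (by norm_num),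
      PySem.Int.floordiv_eq_ediv_of_pos (by norm_num)]
    have h2 : (b + 1) * (b + 1 - 1) = b * (b - 1) + b * 2 := by ring
    rw [h2, Int.add_mul_ediv_right _ _ (by norm_num)]
    omega

theorem mem_sum_eq (R : List Int) (c : Int) (hs : R.Pairwise (· < ·)) (h0 : ∀ r ∈ R, 0 ≤ r) :
    ((PySem.List.pyRange 0 (c+1) 1).filter (fun y => decide (y ∈ R))).sum
      = (R.filter (fun r => decide (r ≤ c))).sum := by
  have heq : (PySem.List.pyRange 0 (c+1) 1).filter (fun y => decide (y ∈ R))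
      = R.filter (fun r => decide (r ≤ c)) := by
    have hp1 : ((PySem.List.pyRange 0 (c+1) 1).filter (fun y => decide (y ∈ R))).Pairwise (· < ·) :=
      (PySem.List.pairwise_lt_pyRange_one 0 (c+1)).filter _
    have hp2 : (R.filter (fun r => decide (r ≤ c))).Pairwise (· < ·) := hs.filter _
    have hperm := List.perm_of_nodup_nodup_toFinset_eq hp1.nodup hp2.nodup (by
      ext y
      simp only [List.mem_toFinset, List.mem_filter, PySem.List.mem_pyRange_one,
        decide_eq_true_eq]
      constructor
      · rintro ⟨⟨_, hlt⟩, hy⟩; exact ⟨hy, by omega⟩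
      · rintro ⟨hy, hle⟩; exact ⟨⟨h0 y hy, by omega⟩, hy⟩)
    exact hperm.eq_of_pairwise (fun a b _ _ h h' => le_antisymm h h')
      (hp1.imp le_of_lt) (hp2.imp le_of_lt)
  rw [heq]

theorem sum_take_comp (n : Int) (R : List Int) (j : Nat) (hs : R.Pairwise (· < ·))
    (h0 : ∀ r ∈ R, 0 ≤ r) (hj1 : 1 ≤ j) (hj : j ≤ (comp n R).length) :
    ((comp n R).take j).sum
      = PySem.Int.floordiv (bSelect R ((j:Int)-1) * (bSelect R ((j:Int)-1) + 1)) 2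
        - (R.filter (fun r => decide (r ≤ bSelect R ((j:Int)-1)))).sum := by
  have hget : PySem.List.pyGet? (comp n R) ((j:Int)-1) = some (bSelect R ((j:Int)-1)) := by
    have := select_get R n 0 ((j:Int)-1) hs h0 (by omega)
      (by have h := hj; unfold comp at h; push_cast; omega)
    rw [zero_add] at this
    unfold comp
    exact this
  have hvE : bSelect R ((j:Int)-1) ∈ comp n R := PySem.List.mem_of_pyGet?_eq_some _ hget
  have hc0 : 0 ≤ bSelect R ((j:Int)-1) := by
    have := PySem.List.mem_pyRange_one.mp (List.mem_filter.mp hvE).1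
    omega
  have hcn : bSelect R ((j:Int)-1) < n := by
    have := PySem.List.mem_pyRange_one.mp (List.mem_filter.mp hvE).1
    omega
  have hgetE : (comp n R)[j-1]'(by omega) = bSelect R ((j:Int)-1) := by
    rw [PySem.List.pyGet?_of_nonneg _ (by omega : (0:Int) ≤ (j:Int)-1)] at hget
    have ht : ((j:Int)-1).toNat = j - 1 := by omega
    rw [ht, List.getElem?_eq_getElem (by omega)] at hget
    exact Option.some.inj hget
  have hpc : (comp n R).Pairwise (· < ·) := (PySem.List.pairwise_lt_pyRange_one 0 n).filter _
  rw [take_pairwise_filter (comp n R) j hpc hj1 hj]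
  simp only [hgetE]
  rw [comp_le n R _ hc0 hcn]
  have hsplit := sum_filter_split (PySem.List.pyRange 0 (bSelect R ((j:Int)-1) + 1) 1)
    (fun y => decide (y ∈ R))
  have hnot : (PySem.List.pyRange 0 (bSelect R ((j:Int)-1) + 1) 1).filter
        (fun y => !(decide (y ∈ R)))
      = comp (bSelect R ((j:Int)-1) + 1) R := by
    unfold comp
    apply List.filter_congr
    intro y _
    simp
  rw [hnot] at hsplit
  rw [mem_sum_eq R (bSelect R ((j:Int)-1)) hs h0] at hsplit
  rw [sum_pyRange _ (by omega)] at hsplit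
  have hmul : (bSelect R ((j:Int)-1) + 1) * (bSelect R ((j:Int)-1) + 1 - 1)
      = bSelect R ((j:Int)-1) * (bSelect R ((j:Int)-1) + 1) := by ring
  rw [hmul] at hsplit
  omega

theorem tail0 (n : Int) : ∀ (t : Nat) (R : List Int) (total : Int),
    R.Pairwise (· < ·) → (∀ r ∈ R, 0 ≤ r) →
    bLoop t ((comp n R).length : Int) R total 0
      = total + ((comp n R).take (min t (comp n R).length)).sum := by
  intro t
  induction t with
  | zero => intro R total _ _; simp [bLoop]
  | succ t ih =>
    intro R total hs h0
    by_cases hE : comp n R = []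
    · rw [hE]; simp [bLoop]
    · have hlen : 0 < (comp n R).length := List.length_pos_iff.mpr hE
      have hm0 : ¬ ((comp n R).length : Int) = 0 := by omega
      have hmod : PySem.Int.mod 0 ((comp n R).length : Int) = 0 := by
        rw [PySem.Int.mod_eq_emod_of_pos (by omega)]; simp
      have hget : PySem.List.pyGet? (comp n R) 0 = some (bSelect R 0) := by
        have := select_get R n 0 0 hs h0 le_rfl
          (by have h := hlen; unfold comp at h; push_cast; omega)
        rw [zero_add] at this
        unfold comp
        exact this
      have hvE : bSelect R 0 ∈ comp n R := PySem.List.mem_of_pyGet?_eq_some _ hget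
      have hvR : bSelect R 0 ∉ R := by
        have := (List.mem_filter.mp hvE).2
        simpa using this
      have hv0 : 0 ≤ bSelect R 0 := by
        have := PySem.List.mem_pyRange_one.mp (List.mem_filter.mp hvE).1
        omega
      obtain ⟨L', hL⟩ : ∃ L', comp n R = bSelect R 0 :: L' := by
        cases hcomp : comp n R with
        | nil => exact absurd hcomp hE
        | cons a L' =>
          rw [hcomp, PySem.List.pyGet?_zero_cons] at hget
          exact ⟨L', by rw [Option.some.inj hget]⟩
      have herase : (comp n R).erase (bSelect R 0)
          = comp n (R.filter (fun r => decide (r < bSelect R 0)) ++ [bSelect R 0]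
              ++ R.filter (fun r => decide (r > bSelect R 0))) := comp_erase n R _ hvR
      have htail : comp n (R.filter (fun r => decide (r < bSelect R 0)) ++ [bSelect R 0]
          ++ R.filter (fun r => decide (r > bSelect R 0))) = L' := by
        rw [← herase, hL, List.erase_cons_head]
      have hlenL : (comp n R).length = L'.length + 1 := by rw [hL]; rfl
      rw [bLoop, if_neg hm0]
      simp only [hmod]
      by_cases hz : ((comp n R).length : Int) - 1 = 0
      · rw [if_pos hz]
        have hmin : min (t+1) (comp n R).length = 1 := by omega
        rw [hmin, hL]
        simp
      · rw [if_neg hz]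
        have hfd : PySem.Int.floordiv 0 (((comp n R).length : Int) - 1) = 0 := by
          rw [PySem.Int.floordiv_eq_ediv_of_pos (by omega)]; simp
        rw [hfd]
        have hsort' := sorted_insert R (bSelect R 0) hs
        have h0' : ∀ r ∈ (R.filter (fun r => decide (r < bSelect R 0)) ++ [bSelect R 0]
            ++ R.filter (fun r => decide (r > bSelect R 0))), 0 ≤ r := by
          intro r hr
          simp only [List.mem_append, List.mem_filter, List.mem_singleton] at hr
          rcases hr with (⟨h1,_⟩|h1)|⟨h1,_⟩
          · exact h0 r h1
          · omega
          · exact h0 r h1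
        have hrec := ih _ (total + bSelect R 0) hsort' h0'
        rw [htail] at hrec
        have hlen' : ((L').length : Int) = ((comp n R).length : Int) - 1 := by
          rw [hlenL]; push_cast; omega
        rw [hlen'] at hrec
        rw [hrec]
        have hmin : min (t+1) (comp n R).length = min t L'.length + 1 := by omega
        rw [hmin, hL, List.take_succ_cons, List.sum_cons]
        omega

theorem b2_m0 (t : Nat) (R : List Int) (total i : Int) :
    b2Tail (b2Loop t 0 R total i) = total := by
  cases t <;> simp [b2Loop, b2Tail]

theorem b2_eq (n : Int) : ∀ (t : Nat) (R : List Int) (total i : Int),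
    R.Pairwise (· < ·) → (∀ r ∈ R, 0 ≤ r) →
    b2Tail (b2Loop t ((comp n R).length : Int) R total i)
      = bLoop t ((comp n R).length : Int) R total i := by
  intro t
  induction t with
  | zero => intro R total i _ _; rfl
  | succ t ih =>
    intro R total i hs h0
    by_cases hE : comp n R = []
    · rw [hE]
      show b2Tail (b2Loop (t+1) ((0:Nat) : Int) R total i) = bLoop (t+1) ((0:Nat) : Int) R total i
      rw [Nat.cast_zero, b2_m0]
      simp [bLoop]
    · have hlen : 0 < (comp n R).length := List.length_pos_iff.mpr hE
      have hm0 : ¬ ((comp n R).length : Int) = 0 := by omega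
      by_cases hi : i = 0
      · subst hi
        rw [b2Loop, if_pos (Or.inr rfl), tail0 n (t+1) R total hs h0, b2Tail]
        rw [if_pos ⟨Nat.succ_pos t, by omega⟩]
        dsimp only []
        have hj : (if ((t+1 : Nat) : Int) < ((comp n R).length : Int) then ((t+1 : Nat) : Int)
            else ((comp n R).length : Int)) = ((min (t+1) (comp n R).length : Nat) : Int) := by
          split_ifs <;> push_cast <;> omega
        rw [hj]
        have hc : R.foldl (fun c r => if r ≤ c then c + 1 else c)
            (((min (t+1) (comp n R).length : Nat) : Int) - 1)
            = bSelect R (((min (t+1) (comp n R).length : Nat) : Int) - 1) := rfl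
        rw [hc, foldl_sub_filter]
        rw [sum_take_comp n R (min (t+1) (comp n R).length) hs h0 (by omega) (by omega)]
        omega
      · rw [b2Loop, bLoop]
        rw [if_neg (by push_neg; exact ⟨hm0, hi⟩), if_neg hm0]
        dsimp only []
        -- the usual bookkeeping for the picked value v
        have hmod0 : 0 ≤ PySem.Int.mod i ((comp n R).length : Int) := by
          rw [PySem.Int.mod_eq_emod_of_pos (by omega)]
          exact Int.emod_nonneg i (by omega)
        have hmodlt : PySem.Int.mod i ((comp n R).length : Int) < ((comp n R).length : Int) := by
          rw [PySem.Int.mod_eq_emod_of_pos (by omega)]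
          exact Int.emod_lt_of_pos i (by omega)
        have hget : PySem.List.pyGet? (comp n R) (PySem.Int.mod i ((comp n R).length : Int))
            = some (bSelect R (PySem.Int.mod i ((comp n R).length : Int))) := by
          have := select_get R n 0 (PySem.Int.mod i ((comp n R).length : Int)) hs h0 hmod0
            (by unfold comp at hmodlt ⊢; exact hmodlt)
          rw [zero_add] at this
          exact this
        set v := bSelect R (PySem.Int.mod i ((comp n R).length : Int)) with hv
        have hvE : v ∈ comp n R := PySem.List.mem_of_pyGet?_eq_some _ hget
        have hvR : v ∉ R := by
          have := (List.mem_filter.mp hvE).2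
          simpa using this
        have hv0 : 0 ≤ v := by
          have := PySem.List.mem_pyRange_one.mp (List.mem_filter.mp hvE).1
          omega
        set R' := R.filter (fun r => decide (r < v)) ++ [v] ++ R.filter (fun r => decide (r > v)) with hR'
        have herase : (comp n R).erase v = comp n R' := comp_erase n R v hvR
        have hlen' : ((comp n R').length : Int) = ((comp n R).length : Int) - 1 := by
          rw [← herase, List.length_erase_of_mem hvE]
          omega
        by_cases hz : ((comp n R).length : Int) - 1 = 0
        · rw [if_pos hz, hz]
          rw [if_neg (by omega : ¬ ((0:Int) > 0))]
          rw [b2_m0]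
        · rw [if_neg hz]
          have hiu : (if ((comp n R).length : Int) - 1 > 0
              then PySem.Int.floordiv i (((comp n R).length : Int) - 1) else i)
              = PySem.Int.floordiv i (((comp n R).length : Int) - 1) := by
            rw [if_pos (by omega)]
          rw [hiu]
          have hsort' : R'.Pairwise (· < ·) := sorted_insert R v hs
          have h0' : ∀ r ∈ R', 0 ≤ r := by
            intro r hr
            rw [hR'] at hr
            simp only [List.mem_append, List.mem_filter, List.mem_singleton] at hr
            rcases hr with (⟨h1,_⟩|h1)|⟨h1,_⟩
            · exact h0 r h1
            · omega
            · exact h0 r h1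
          have hrec := ih R' (total + v) (PySem.Int.floordiv i (((comp n R).length : Int) - 1))
            hsort' h0'
          rw [hlen'] at hrec
          exact hrec

-- ===== VERDICT (by name: the statement is the Claim_ definition above) =====
theorem ith_permutation_spec : Claim_equal_ith_permutation := by
  intro n k i _
  unfold Spec_ith_permutation ith_permutation ith_permutation_alt
  have h0 : comp n [] = PySem.List.pyRange 0 n 1 := by simp [comp]
  have h1 : ((comp n []).length : Int) = (if n > 0 then n else 0) := by
    rw [h0, PySem.List.length_pyRange_one]
    omega
  have hmain := main_inv n k.toNat [] [] i List.Pairwise.nil (by intro r hr; cases hr)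
  have hb2 := b2_eq n k.toNat [] 0 i List.Pairwise.nil (by intro r hr; cases hr)
  rw [← h0, hmain, ← h1, hb2]
  rfl
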